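-- pv_equiv track=rewrite | github.com/linhdvu14/cp-sols | sols/CodeForces/1798_d2/B_Three_Sevens.py | solve
-- ===== SOURCE A (Python) =====
-- def solve(N, A):
--     res = [-1] * N
--     bad = set()
--     for i in range(N - 1, -1, -1):
--         for a in A[i]:
--             if a not in bad:
--                 res[i] = a
--                 break
--         else:
--             return [-1]
--         bad |= set(A[i])
--
--     return res
-- ===== SOURCE B (Python) =====
-- def solve(N, A):
--     # Two-pass: precompute last occurrence index of each value, then pick per day.
--     last = {}
--     for i in range(N):
--         for a in A[i]:
--             last[a] = i
--     res = []
--     for i in range(N):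
--         for a in A[i]:
--             if last[a] == i:
--                 res.append(a)
--                 break
--         else:
--             return [-1]
--     return res
-- ===== Notes on version B (the rewrite author's own statement) =====
-- stated objective: alternative
-- what changed: Replaces the backward sweep that accumulates a growing 'seen on later days' set with two forward passes: first build a last-occurrence index for every value, then select per day the first value whose last occurrence is that day.
import Mathlib
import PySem

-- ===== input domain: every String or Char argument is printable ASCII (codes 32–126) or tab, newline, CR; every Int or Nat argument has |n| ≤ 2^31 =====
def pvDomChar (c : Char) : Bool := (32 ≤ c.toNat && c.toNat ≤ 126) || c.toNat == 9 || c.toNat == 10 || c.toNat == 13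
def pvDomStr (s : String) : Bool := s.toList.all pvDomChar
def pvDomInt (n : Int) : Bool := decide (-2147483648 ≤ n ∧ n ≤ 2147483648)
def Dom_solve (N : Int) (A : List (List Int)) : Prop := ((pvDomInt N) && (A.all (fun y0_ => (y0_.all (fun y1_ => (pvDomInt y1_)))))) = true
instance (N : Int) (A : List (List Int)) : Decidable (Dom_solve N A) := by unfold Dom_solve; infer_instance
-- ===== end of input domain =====

-- B replaces A's backward sweep with a 'seen on later days' set by two forward passes:
-- build a last-occurrence dict, then pick per day the first value whose last occurrence is that day.

-- ===== PORT A =====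
-- inner 'for a in A[i]: if a not in bad: … break / else: …' — first element not in bad
def pvFirstNotIn (row : List Int) (bad : PySem.Set Int) : Option Int :=
  match row with
  | [] => none
  | a :: rest => if PySem.Set.contains bad a then pvFirstNotIn rest bad else some a

-- backward loop of A; 'none' = IndexError from A[i] (excluded by Pre_solve)
def pvLoopA (A : List (List Int)) : List Int → List Int → PySem.Set Int → Option (List Int)
  | [], res, _ => some res
  | i :: is, res, bad =>
    match PySem.List.pyGet? A i with
    | none => none
    | some row =>
      match pvFirstNotIn row bad with
      | none => some [-1]
      | some a => pvLoopA A is (res.set i.toNat a) (PySem.Set.union bad (PySem.Set.ofList row))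

def solve (N : Int) (A : List (List Int)) : List Int :=
  -- '.getD []' is only reached where Python raises IndexError (outside Pre_solve)
  (pvLoopA A (PySem.List.pyRange (N - 1) (-1) (-1)) (List.replicate N.toNat (-1)) PySem.Set.empty).getD []

-- ===== PORT B =====
-- pass 1: last[a] = i for every a in A[i], i in range(N)
-- ('(pyGet? …).getD []' only departs from Python where A[i] raises IndexError, outside Pre_solve)
def pvBuildLast (A : List (List Int)) (idxs : List Int) : PySem.Dict Int Int :=
  idxs.foldl (fun d i => ((PySem.List.pyGet? A i).getD []).foldl (fun d a => d.insert a i) d) PySem.Dict.empty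

-- inner 'for a in A[i]: if last[a] == i: … break / else: …'
def pvPickB (row : List Int) (last : PySem.Dict Int Int) (i : Int) : Option Int :=
  match row with
  | [] => none
  | a :: rest => if last.get? a = some i then some a else pvPickB rest last i

-- pass 2: forward selection with early return [-1]
def pvLoopB (A : List (List Int)) (last : PySem.Dict Int Int) : List Int → List Int → List Int
  | [], res => res
  | i :: is, res =>
    match pvPickB ((PySem.List.pyGet? A i).getD []) last i with
    | none => [-1]
    | some a => pvLoopB A last is (res ++ [a])

def solve_alt (N : Int) (A : List (List Int)) : List Int :=
  pvLoopB A (pvBuildLast A (PySem.List.pyRange 0 N 1)) (PySem.List.pyRange 0 N 1) []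

-- ===== PRECONDITION & SPEC =====
-- A indexes A[i] for i = N-1 … 0, so it raises IndexError iff N > len(A); exactly those inputs are excluded.
def Pre_solve (N : Int) (A : List (List Int)) : Prop := N ≤ (A.length : Int)
instance (N : Int) (A : List (List Int)) : Decidable (Pre_solve N A) := by unfold Pre_solve; infer_instance
def pvWitness_solve : Int × List (List Int) := (2, [[7, 1], [2]])

def Spec_solve (N : Int) (A : List (List Int)) (out : List Int) : Prop := out = solve_alt N A
instance (N : Int) (A : List (List Int)) (out : List Int) : Decidable (Spec_solve N A out) := by unfold Spec_solve; infer_instance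

-- ===== CLAIM (what is proved, stated in full; the proofs are below) =====
def Claim_equal_solve : Prop := ∀ (N : Int) (A : List (List Int)), Dom_solve N A → Pre_solve N A → Spec_solve N A (solve N A)

-- ===== LEMMAS AND PROOFS =====

-- the k-th row, and the values appearing on days k+1 … n-1
def pvRow (A : List (List Int)) (k : Nat) : List Int := A.getD k []
def pvBadAt (A : List (List Int)) (n k : Nat) : List Int := ((A.take n).drop (k + 1)).flatten
-- the value A writes into res[k] (and B appends on day k): first value of row k absent later
def pvPick (A : List (List Int)) (n k : Nat) : Option Int :=
  pvFirstNotIn (pvRow A k) (pvBadAt A n k)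
-- the per-day success list
def pvVals (A : List (List Int)) (n k : Nat) : List Int :=
  (List.range k).map (fun j => (pvPick A n j).getD 0)

theorem pvMem_badAt (A : List (List Int)) (n k : Nat) (hn : n ≤ A.length) (a : Int) :
    a ∈ pvBadAt A n k ↔ ∃ j, k < j ∧ j < n ∧ a ∈ pvRow A j := by
  unfold pvBadAt pvRow
  rw [List.mem_flatten]
  constructor
  · rintro ⟨l, hl, ha⟩
    obtain ⟨j, hget⟩ := List.mem_iff_getElem?.1 hl
    rw [List.getElem?_drop, List.getElem?_take] at hget
    by_cases hjn : k + 1 + j < n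
    · rw [if_pos hjn] at hget
      have hjA : k + 1 + j < A.length := by omega
      rw [List.getElem?_eq_getElem hjA] at hget
      refine ⟨k + 1 + j, by omega, hjn, ?_⟩
      rw [List.getD_eq_getElem _ _ hjA, Option.some.inj hget]
      exact ha
    · rw [if_neg hjn] at hget
      exact absurd hget (by simp)
  · rintro ⟨j, hkj, hjn, ha⟩
    have hjA : j < A.length := by omega
    rw [List.getD_eq_getElem _ _ hjA] at ha
    refine ⟨A[j], ?_, ha⟩
    rw [List.mem_iff_getElem?]
    refine ⟨j - (k + 1), ?_⟩
    rw [List.getElem?_drop, List.getElem?_take,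
        if_pos (show k + 1 + (j - (k + 1)) < n by omega),
        show k + 1 + (j - (k + 1)) = j by omega]
    exact List.getElem?_eq_getElem hjA

theorem pvFirstNotIn_congr (row : List Int) (S T : PySem.Set Int)
    (h : ∀ x, x ∈ S ↔ x ∈ T) : pvFirstNotIn row S = pvFirstNotIn row T := by
  induction row with
  | nil => rfl
  | cons a rest ih =>
    unfold pvFirstNotIn
    have hST : PySem.Set.contains S a = PySem.Set.contains T a := by
      by_cases hm : a ∈ T
      · rw [(PySem.Set.contains_iff S a).2 ((h a).2 hm), (PySem.Set.contains_iff T a).2 hm]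
      · have h1 : PySem.Set.contains S a = false := by
          cases hc : PySem.Set.contains S a
          · rfl
          · exact absurd ((h a).1 ((PySem.Set.contains_iff S a).1 hc)) hm
        have h2 : PySem.Set.contains T a = false := by
          cases hc : PySem.Set.contains T a
          · rfl
          · exact absurd ((PySem.Set.contains_iff T a).1 hc) hm
        rw [h1, h2]
    rw [hST, ih]

-- getting the k-th row via pyGet?
theorem pvGet_row (A : List (List Int)) (k : Nat) (hk : k < A.length) :
    PySem.List.pyGet? A (k : Int) = some (pvRow A k) := by
  rw [PySem.List.pyGet?_natCast, List.getElem?_eq_getElem hk]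
  unfold pvRow
  rw [List.getD_eq_getElem _ _ hk]

-- splitting off row k of the 'still relevant' suffix
theorem pvDrop_cons (A : List (List Int)) (n k : Nat) (hk : k < n) (hn : n ≤ A.length) :
    (A.take n).drop k = pvRow A k :: (A.take n).drop (k + 1) := by
  have hkA : k < A.length := by omega
  have hk' : k < (A.take n).length := by simp [List.length_take]; omega
  rw [List.drop_eq_getElem_cons hk']
  congr 1
  rw [List.getElem_take]
  unfold pvRow
  rw [List.getD_eq_getElem _ _ hkA]

-- ===== A-side main lemma (backward loop) =====
theorem pvLoopA_spec (A : List (List Int)) (n : Nat) (hn : n ≤ A.length) :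
    ∀ (k : Nat), k ≤ n → ∀ (res : List Int) (bad : PySem.Set Int), res.length = n →
      (∀ x, x ∈ bad ↔ x ∈ ((A.take n).drop k).flatten) →
      pvLoopA A (PySem.List.pyRange ((k : Int) - 1) (-1) (-1)) res bad =
        if ∀ j, j < k → (pvPick A n j).isSome then some (pvVals A n k ++ res.drop k)
        else some [-1] := by
  intro k
  induction k with
  | zero =>
    intro _ res bad hres _
    rw [PySem.List.pyRange_neg_one_eq_nil (show ((0 : Nat) : Int) - 1 ≤ -1 by simp)]
    simp [pvLoopA, pvVals]
  | succ k ih =>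
    intro hk res bad hbadlen hbad
    rw [show (((k + 1 : Nat) : Int) - 1) = (k : Int) by push_cast; ring,
        PySem.List.pyRange_neg_one_cons (show (-1 : Int) < (k : Int) by omega)]
    have hkA : k < A.length := by omega
    unfold pvLoopA
    rw [pvGet_row A k hkA]
    have hdropcons := pvDrop_cons A n k (by omega) hn
    have hscan : pvFirstNotIn (pvRow A k) bad = pvPick A n k := by
      unfold pvPick pvBadAt
      exact pvFirstNotIn_congr _ _ _ hbad
    simp only [hscan]
    cases hpick : pvPick A n k with
    | none =>
      simp only
      rw [if_neg]
      intro hall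
      have := hall k (by omega)
      rw [hpick] at this
      simp at this
    | some v =>
      simp only
      have hresk : k < res.length := by omega
      have ih' := ih (by omega) (res.set k v)
          (PySem.Set.union bad (PySem.Set.ofList (pvRow A k)))
          (by simp [hbadlen])
          (by
            intro x
            rw [PySem.Set.mem_union, hbad x, PySem.Set.mem_ofList, hdropcons]
            simp
            exact Or.comm)
      rw [show ((k : Int)).toNat = k from Int.toNat_natCast k, ih']
      by_cases hall : ∀ j, j < k → (pvPick A n j).isSome
      · rw [if_pos hall, if_pos (by
          intro j hj
          rcases Nat.lt_succ_iff_lt_or_eq.1 hj with h | h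
          · exact hall j h
          · subst h; rw [hpick]; simp)]
        congr 1
        have hdropset : (res.set k v).drop k = v :: res.drop (k + 1) := by
          rw [List.drop_eq_getElem_cons (show k < (res.set k v).length by simp [hresk]),
              List.getElem_set_self, List.drop_set_of_lt (by omega)]
        rw [hdropset]
        unfold pvVals
        rw [List.range_succ, List.map_append]
        simp [hpick]
      · rw [if_neg hall, if_neg (by
          intro hc
          exact hall (fun j hj => hc j (by omega)))]

-- ===== B-side lemmas =====
-- inserting a whole row maps every member to i
theorem pvRowInsert_get? (row : List Int) (i : Int) (d : PySem.Dict Int Int) (x : Int) :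
    (row.foldl (fun d a => d.insert a i) d).get? x = if x ∈ row then some i else d.get? x := by
  induction row generalizing d with
  | nil => simp
  | cons a rest ih =>
    simp only [List.foldl_cons]
    rw [ih]
    by_cases hx : x ∈ rest
    · simp [hx]
    · by_cases hxa : x = a
      · subst hxa
        simp [hx, PySem.Dict.get?_insert_self]
      · simp [hx, hxa, PySem.Dict.get?_insert_of_ne _ _ hxa]

-- the dict built over days 0 … m-1: get? a = some k iff k is the LAST day < m carrying a
theorem pvBuildLast_get? (A : List (List Int)) (m : Nat) (hm : m ≤ A.length) (a : Int) (k : Nat) :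
    (pvBuildLast A (PySem.List.pyRange 0 (m : Int) 1)).get? a = some (k : Int) ↔
      (k < m ∧ a ∈ pvRow A k ∧ ∀ j, k < j → j < m → a ∉ pvRow A j) := by
  induction m with
  | zero =>
    rw [PySem.List.pyRange_one_eq_nil (by simp)]
    simp [pvBuildLast]
  | succ m ih =>
    have hm' : m ≤ A.length := by omega
    unfold pvBuildLast at *
    rw [show (((m + 1 : Nat)) : Int) = (m : Int) + 1 by push_cast; ring,
        PySem.List.pyRange_one_succ_right (show (0 : Int) ≤ (m : Int) by omega),
        List.foldl_append]
    simp only [List.foldl_cons, List.foldl_nil]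
    rw [pvGet_row A m (by omega)]
    simp only [Option.getD_some]
    rw [pvRowInsert_get? (pvRow A m) (m : Int) _ a]
    by_cases ham : a ∈ pvRow A m
    · rw [if_pos ham]
      constructor
      · intro h
        have hkm : k = m := by
          have := Option.some.inj h
          exact_mod_cast this.symm
        subst hkm
        exact ⟨by omega, ham, by intro j h1 h2 _; omega⟩
      · rintro ⟨h1, _, h3⟩
        have hkm : k = m := by
          by_contra hne
          exact h3 m (by omega) (by omega) ham
        subst hkm; rfl
    · rw [if_neg ham, ih hm']
      constructor
      · rintro ⟨h1, h2, h3⟩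
        refine ⟨by omega, h2, ?_⟩
        intro j hj1 hj2
        rcases Nat.lt_succ_iff_lt_or_eq.1 hj2 with h | h
        · exact h3 j hj1 h
        · subst h; exact ham
      · rintro ⟨h1, h2, h3⟩
        have hkm : k ≠ m := by rintro rfl; exact ham h2
        exact ⟨by omega, h2, fun j hj1 hj2 => h3 j hj1 (by omega)⟩

-- on row k the B-scan and the reference pick coincide
theorem pvPickB_eq_pick (A : List (List Int)) (n : Nat) (hn : n ≤ A.length) (k : Nat) (hk : k < n) :
    ∀ (row : List Int), (∀ a ∈ row, a ∈ pvRow A k) →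
      pvPickB row (pvBuildLast A (PySem.List.pyRange 0 (n : Int) 1)) (k : Int) =
        pvFirstNotIn row (pvBadAt A n k) := by
  intro row hrow
  induction row with
  | nil => rfl
  | cons a rest ih =>
    have ha : a ∈ pvRow A k := hrow a (by simp)
    unfold pvPickB pvFirstNotIn
    have htest : ((pvBuildLast A (PySem.List.pyRange 0 (n : Int) 1)).get? a = some (k : Int)) ↔
        ¬ (a ∈ pvBadAt A n k) := by
      rw [pvBuildLast_get? A n hn a k, pvMem_badAt A n k hn a]
      constructor
      · rintro ⟨_, _, h3⟩ ⟨j, hj1, hj2, hj3⟩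
        exact h3 j hj1 hj2 hj3
      · intro h
        exact ⟨hk, ha, fun j h1 h2 hmem => h ⟨j, h1, h2, hmem⟩⟩
    by_cases hmem : a ∈ pvBadAt A n k
    · rw [if_neg (fun hc => (htest.1 hc) hmem),
          if_pos ((PySem.Set.contains_iff _ _).2 hmem)]
      exact ih (fun x hx => hrow x (by simp [hx]))
    · rw [if_pos (htest.2 hmem), if_neg (by
        intro hc
        exact hmem ((PySem.Set.contains_iff _ _).1 hc))]

-- ===== B-side main lemma (forward loop) =====
theorem pvLoopB_spec (A : List (List Int)) (n : Nat) (hn : n ≤ A.length) :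
    ∀ (c k : Nat), k + c = n → ∀ (acc : List Int),
      pvLoopB A (pvBuildLast A (PySem.List.pyRange 0 (n : Int) 1))
        (PySem.List.pyRange (k : Int) (n : Int) 1) acc =
        if ∀ j, k ≤ j → j < n → (pvPick A n j).isSome
        then acc ++ ((List.range' k c).map (fun j => (pvPick A n j).getD 0))
        else [-1] := by
  intro c
  induction c with
  | zero =>
    intro k hk acc
    rw [PySem.List.pyRange_one_eq_nil (show (n : Int) ≤ (k : Int) by omega)]
    simp only [pvLoopB]
    rw [if_pos (by intro j h1 h2; omega)]
    simp
  | succ c ih =>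
    intro k hk acc
    have hkn : k < n := by omega
    rw [PySem.List.pyRange_one_cons (show (k : Int) < (n : Int) by exact_mod_cast hkn)]
    unfold pvLoopB
    rw [pvGet_row A k (by omega)]
    simp only [Option.getD_some]
    rw [pvPickB_eq_pick A n hn k hkn (pvRow A k) (fun a h => h),
        show pvFirstNotIn (pvRow A k) (pvBadAt A n k) = pvPick A n k from rfl]
    cases hpick : pvPick A n k with
    | none =>
      simp only
      rw [if_neg]
      intro hall
      have := hall k (by omega) hkn
      rw [hpick] at this
      simp at this
    | some v =>
      simp only
      rw [show ((k : Int) + 1) = (((k + 1 : Nat) : Int)) by push_cast; ring,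
          ih (k + 1) (by omega) (acc ++ [v])]
      by_cases hall : ∀ j, k + 1 ≤ j → j < n → (pvPick A n j).isSome
      · rw [if_pos hall, if_pos (by
          intro j h1 h2
          rcases Nat.lt_or_ge j (k + 1) with h | h
          · have hjk : j = k := by omega
            subst hjk; rw [hpick]; simp
          · exact hall j h h2)]
        rw [List.range'_succ, List.map_cons]
        simp [hpick]
      · rw [if_neg hall, if_neg (by
          intro hc
          exact hall (fun j h1 h2 => hc j (by omega) h2))]

-- ===== VERDICT (by name: the statement is the Claim_ definition above) =====
theorem solve_spec : Claim_equal_solve := by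
  intro N A _ hpre
  unfold Spec_solve solve solve_alt
  by_cases hN : N ≤ 0
  · rw [PySem.List.pyRange_neg_one_eq_nil (by omega), PySem.List.pyRange_one_eq_nil (by omega)]
    simp [pvLoopA, pvLoopB]
    omega
  · obtain ⟨n, rfl⟩ : ∃ n : Nat, N = (n : Int) := ⟨N.toNat, by omega⟩
    have hnA : n ≤ A.length := by unfold Pre_solve at hpre; exact_mod_cast hpre
    rw [show ((n : Int)).toNat = n from Int.toNat_natCast n]
    rw [pvLoopA_spec A n hnA n (le_refl n) (List.replicate n (-1)) PySem.Set.empty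
        (by simp) (by simp [PySem.Set.empty])]
    have hB := pvLoopB_spec A n hnA n 0 (by omega) []
    rw [Nat.cast_zero] at hB
    rw [hB]
    by_cases hall : ∀ j, j < n → (pvPick A n j).isSome
    · rw [if_pos hall, if_pos (fun j _ h2 => hall j h2)]
      simp only [Option.getD_some]
      rw [List.drop_replicate]
      simp [pvVals, List.range_eq_range']
    · rw [if_neg hall, if_neg (fun hc => hall (fun j hj => hc j (by omega) hj))]
      simp
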